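-- pv_equiv track=rewrite | github.com/krispharper/AdventOfCode | 2025/6/2.py | _parse_input_lines
-- ===== SOURCE A (Python) =====
-- def _parse_input_lines(value: list[str]) -> list[list[list[str]]]:
--     transposed = [[] for _ in range(len(value[0]))]
--
--     for i in range(len(value[0])):
--         for j in range(len(value)):
--             transposed[i].append(value[j][i])
--
--     result = []
--     row_group = []
--
--     for row in transposed:
--         if set(row) == set(" "):
--             result.append(row_group)
--             row_group = []
--         else:
--             row_group.append(row)
--
--     result.append(row_group)
--
--     return result
-- ===== SOURCE B (Python) =====
-- def _parse_input_lines(value: list[str]) -> list[list[list[str]]]: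
--     width = len(value[0])
--     transposed = [[value[j][i] for j in range(len(value))] for i in range(width)]
--     seps = [i for i, col in enumerate(transposed) if all(c == " " for c in col)]
--     bounds = [-1] + seps + [width]
--     return [transposed[bounds[k] + 1 : bounds[k + 1]] for k in range(len(bounds) - 1)]
-- ===== Notes on version B (the rewrite author's own statement) =====
-- stated objective: alternative
-- what changed: B replaces A's mutate-in-place transpose loops and the running (result,row_group) accumulator with a comprehension transpose, a scan collecting separator-column indices, and slicing the column list between consecutive separator indices (with virtual boundaries -1 and width).
import Mathlib
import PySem

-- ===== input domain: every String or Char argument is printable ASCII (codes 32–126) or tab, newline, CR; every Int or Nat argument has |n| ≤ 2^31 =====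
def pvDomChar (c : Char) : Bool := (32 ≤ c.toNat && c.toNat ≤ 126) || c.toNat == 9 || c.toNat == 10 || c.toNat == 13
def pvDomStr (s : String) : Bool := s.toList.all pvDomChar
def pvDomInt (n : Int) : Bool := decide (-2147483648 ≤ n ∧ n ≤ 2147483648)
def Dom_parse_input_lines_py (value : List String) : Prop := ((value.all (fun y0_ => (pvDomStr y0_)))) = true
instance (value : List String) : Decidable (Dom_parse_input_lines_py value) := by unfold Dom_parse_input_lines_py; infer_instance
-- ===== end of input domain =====

-- B restructures A: comprehension transpose, then separator-column indices and slicing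
-- between consecutive separators, instead of A's in-place appends and running accumulator.

-- ===== PORT A =====
-- value[j][i]: Python string indexing returns a 1-char str; none (IndexError) is excluded by Pre_.
def pvIndexChar (s : String) (i : Int) : String :=
  match PySem.Str.pyGet? s i with
  | some c => String.ofList [c]
  | none => ""

def parse_input_lines_py (value : List String) : List (List (List String)) :=
  -- value[0] raises IndexError on []; excluded by Pre_
  let v0 := (PySem.List.pyGet? value 0).getD ""
  let n : Int := PySem.Str.len v0
  let transposed0 : List (List String) := (PySem.List.pyRange 0 n 1).map (fun _ => [])
  let transposed := (PySem.List.pyRange 0 n 1).foldl (fun t i =>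
    (PySem.List.pyRange 0 (value.length : Int) 1).foldl (fun t j =>
      PySem.List.pySetD t i
        (PySem.List.pyGetD t i [] ++ [pvIndexChar (PySem.List.pyGetD value j "") i])) t) transposed0
  let fin := transposed.foldl (fun (acc : List (List (List String)) × List (List String)) row =>
    if PySem.Set.equal (PySem.Set.ofList row) (PySem.Set.ofList [" "]) then (acc.1 ++ [acc.2], [])
    else (acc.1, acc.2 ++ [row])) ([], [])
  fin.1 ++ [fin.2]

-- ===== PORT B =====
def parse_input_lines_py_alt (value : List String) : List (List (List String)) :=
  let width : Int := PySem.Str.len ((PySem.List.pyGet? value 0).getD "")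
  let transposed : List (List String) := (PySem.List.pyRange 0 width 1).map (fun i =>
    (PySem.List.pyRange 0 (value.length : Int) 1).map (fun j =>
      pvIndexChar (PySem.List.pyGetD value j "") i))
  let seps : List Int :=
    ((PySem.List.enumerate transposed).filter (fun q => q.2.all (fun c => c == " "))).map (·.1)
  let bounds : List Int := [(-1 : Int)] ++ seps ++ [width]
  (PySem.List.pyRange 0 ((bounds.length : Int) - 1) 1).map (fun k =>
    PySem.List.slice transposed (some (PySem.List.pyGetD bounds k 0 + 1))
      (some (PySem.List.pyGetD bounds (k + 1) 0)))

-- ===== PRECONDITION & SPEC =====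
-- Pre_ excludes exactly the inputs where Python A raises IndexError: the empty list
-- (value[0]) and ragged inputs where some row is shorter than value[0] (value[j][i]).
def Pre_parse_input_lines_py (value : List String) : Prop :=
  value ≠ [] ∧ ∀ s ∈ value, PySem.Str.len (value.headD "") ≤ PySem.Str.len s
instance (value : List String) : Decidable (Pre_parse_input_lines_py value) := by
  unfold Pre_parse_input_lines_py; infer_instance

def pvWitness_parse_input_lines_py : List String := ["a b", "c d"]

def Spec_parse_input_lines_py (value : List String) (out : List (List (List String))) : Prop :=
  out = parse_input_lines_py_alt value
instance (value : List String) (out : List (List (List String))) : Decidable (Spec_parse_input_lines_py value out) := by unfold Spec_parse_input_lines_py; infer_instance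

-- ===== CLAIM (what is proved, stated in full; the proofs are below) =====
def Claim_equal_parse_input_lines_py : Prop := ∀ (value : List String), Dom_parse_input_lines_py value → Pre_parse_input_lines_py value → Spec_parse_input_lines_py value (parse_input_lines_py value)

-- ===== LEMMAS AND PROOFS =====
theorem pvEnumShift {α : Type} (xs : List α) (s : Int) :
    PySem.List.enumerate xs s = (PySem.List.enumerate xs 0).map (fun q => (q.1 + s, q.2)) := by
  induction xs generalizing s with
  | nil => simp [PySem.List.enumerate_nil]
  | cons x t ih =>
    rw [PySem.List.enumerate_cons, PySem.List.enumerate_cons, ih (s+1), ih (0+1)]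
    simp only [List.map_cons, List.map_map, List.cons.injEq]
    refine ⟨by simp, ?_⟩
    apply List.map_congr_left; intro q hq; simp [Function.comp]; omega

def pvSepsI {α : Type} (p : α → Bool) (T : List α) : List Int :=
  ((PySem.List.enumerate T).filter (fun q => p q.2)).map (·.1)

theorem pvSepsI_cons {α : Type} (p : α → Bool) (c : α) (T : List α) :
    pvSepsI p (c :: T) = if p c then 0 :: (pvSepsI p T).map (· + 1) else (pvSepsI p T).map (· + 1) := by
  unfold pvSepsI
  rw [PySem.List.enumerate_cons, pvEnumShift T (0+1)]
  rw [List.filter_cons, List.filter_map]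
  split
  · simp [List.map_map, Function.comp_def]
  · simp [List.map_map, Function.comp_def]

theorem pvSepsI_nonneg {α : Type} (p : α → Bool) (T : List α) : ∀ x ∈ pvSepsI p T, 0 ≤ x := by
  induction T with
  | nil => simp [pvSepsI, PySem.List.enumerate_nil]
  | cons c t ih =>
    intro x hx
    rw [pvSepsI_cons] at hx
    split at hx
    · rcases List.mem_cons.mp hx with h | h
      · omega
      · obtain ⟨y, hy, rfl⟩ := List.mem_map.mp h; have := ih y hy; omega
    · obtain ⟨y, hy, rfl⟩ := List.mem_map.mp hx; have := ih y hy; omega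

def pvSplit {α : Type} (p : α → Bool) : List α → List (List α)
  | [] => [[]]
  | c :: t => if p c then [] :: pvSplit p t else (pvSplit p t).modifyHead (c :: ·)

theorem pvFoldGroup {α : Type} (p : α → Bool) (T : List α) : ∀ (res : List (List α)) (acc : List α),
    (let f := T.foldl (fun (a : List (List α) × List α) row =>
        if p row then (a.1 ++ [a.2], []) else (a.1, a.2 ++ [row])) (res, acc)
     f.1 ++ [f.2]) = res ++ (pvSplit p T).modifyHead (acc ++ ·) := by
  induction T with
  | nil => intro res acc; simp [pvSplit]
  | cons c t ih =>
    intro res acc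
    simp only [List.foldl_cons, pvSplit]
    split
    · rw [ih (res ++ [acc]) []]
      cases h : pvSplit p t with
      | nil => simp
      | cons g r => simp [List.modifyHead]
    · rw [ih res (acc ++ [c])]
      cases h : pvSplit p t with
      | nil => simp [List.modifyHead]
      | cons g r => simp [List.modifyHead]

theorem pvInner {β : Type} (g : Nat → β) : ∀ (js : List Nat) (t : List (List β)) (i : Nat), i < t.length →
    js.foldl (fun t j => t.set i (t.getD i [] ++ [g j])) t = t.set i (t.getD i [] ++ js.map g) := by
  intro js
  induction js with
  | nil =>
    intro t i hi
    simp [List.getD_eq_getElem?_getD, List.getElem?_eq_getElem hi, List.set_getElem_self]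
  | cons j js ih =>
    intro t i hi
    simp only [List.foldl_cons, List.map_cons]
    rw [ih _ i (by simpa using hi), List.set_set]
    have h1 : (t.set i (t.getD i [] ++ [g j])).getD i [] = t.getD i [] ++ [g j] := by
      simp [List.getD_eq_getElem?_getD, hi]
    rw [h1]; simp

theorem pvOuter {β : Type} (col : Nat → List β) : ∀ (is : List Nat) (t : List (List β)),
    is.Nodup → (∀ i ∈ is, i < t.length) →
    (is.foldl (fun t i => t.set i (t.getD i [] ++ col i)) t).length = t.length ∧
    ∀ k, (is.foldl (fun t i => t.set i (t.getD i [] ++ col i)) t).getD k [] =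
      if k ∈ is then t.getD k [] ++ col k else t.getD k [] := by
  intro is
  induction is with
  | nil => intro t _ _; simp
  | cons i is ih =>
    intro t hnd hb
    have hi : i < t.length := hb i (by simp)
    simp only [List.foldl_cons]
    have hnd' := (List.nodup_cons.mp hnd)
    obtain ⟨hlen, hget⟩ := ih (t.set i (t.getD i [] ++ col i)) hnd'.2
      (fun x hx => by simpa using hb x (by simp [hx]))
    refine ⟨by simpa using hlen, ?_⟩
    intro k
    rw [hget k]
    by_cases hk : k = i
    · subst hk
      simp [hnd'.1, List.getD_eq_getElem?_getD, hi]
    · simp only [List.getD_eq_getElem?_getD, List.getElem?_set_ne (show i ≠ k by omega)]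
      simp [List.mem_cons, hk]

def pvMkGroups {α : Type} (T : List α) (bs : List Int) : List (List α) :=
  (bs.zip bs.tail).map (fun q => PySem.List.slice T (some (q.1 + 1)) (some q.2))

theorem pvSliceShift {α : Type} (c : α) (T : List α) (a b : Int) (ha : -1 ≤ a) (hb : 0 ≤ b) :
    PySem.List.slice (c :: T) (some (a + 1 + 1)) (some (b + 1)) = PySem.List.slice T (some (a + 1)) (some b) := by
  rw [PySem.List.slice_toNat _ (by omega) (by omega), PySem.List.slice_toNat _ (by omega) hb]
  have h1 : (a + 1 + 1).toNat = (a + 1).toNat + 1 := by omega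
  have h2 : (b + 1).toNat = b.toNat + 1 := by omega
  rw [h1, h2, List.drop_succ_cons]
  congr 1
  omega

theorem pvMkGroups_cons {α : Type} (T : List α) (x y : Int) (rest : List Int) :
    pvMkGroups T (x :: y :: rest) = PySem.List.slice T (some (x + 1)) (some y) :: pvMkGroups T (y :: rest) := by
  rfl

theorem pvMkGroups_shift {α : Type} (c : α) (T : List α) (bs : List Int)
    (h1 : ∀ x ∈ bs, -1 ≤ x) (h2 : ∀ x ∈ bs.tail, 0 ≤ x) :
    pvMkGroups (c :: T) (bs.map (· + 1)) = pvMkGroups T bs := by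
  unfold pvMkGroups
  rw [← List.map_tail, List.zip_map]
  rw [List.map_map]
  apply List.map_congr_left
  intro q hq
  have hq1 : q.1 ∈ bs := List.of_mem_zip hq |>.1
  have hq2 : q.2 ∈ bs.tail := List.of_mem_zip hq |>.2
  exact pvSliceShift c T q.1 q.2 (h1 _ hq1) (h2 _ hq2)

def pvBounds {α : Type} (p : α → Bool) (T : List α) : List Int :=
  -1 :: (pvSepsI p T ++ [(T.length : Int)])

theorem pvBounds_shape {α : Type} (p : α → Bool) (T : List α) :
    ∃ z u, pvBounds p T = -1 :: z :: u ∧ 0 ≤ z ∧ (∀ x ∈ u, 0 ≤ x) ∧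
      (∀ x ∈ z :: u, -1 ≤ x) := by
  unfold pvBounds
  cases hs : pvSepsI p T with
  | nil => exact ⟨(T.length : Int), [], by simp, Int.natCast_nonneg _, by simp, by simp⟩
  | cons z u =>
    refine ⟨z, u ++ [(T.length : Int)], by simp, ?_, ?_, ?_⟩
    · have := pvSepsI_nonneg p T z (by rw [hs]; simp)
      omega
    · intro x hx
      rcases List.mem_append.mp hx with h | h
      · exact pvSepsI_nonneg p T x (by rw [hs]; simp [h])
      · simp at h; subst h; exact Int.natCast_nonneg _
    · intro x hx
      rcases List.mem_cons.mp hx with h | h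
      · subst h; have := pvSepsI_nonneg p T x (by rw [hs]; simp); omega
      · rcases List.mem_append.mp h with h | h
        · have := pvSepsI_nonneg p T x (by rw [hs]; simp [h]); omega
        · simp at h; subst h; exact Int.natCast_nonneg _

theorem pvSliceZeroSucc {α : Type} (c : α) (T : List α) (z : Int) (hz : 0 ≤ z) :
    PySem.List.slice (c :: T) (some ((-1 : Int) + 1)) (some (z + 1))
      = c :: PySem.List.slice T (some ((-1 : Int) + 1)) (some z) := by
  rw [PySem.List.slice_toNat _ (by omega) (by omega), PySem.List.slice_toNat _ (by omega) hz]
  have h2 : (z + 1).toNat = z.toNat + 1 := by omega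
  simp [h2]

theorem pvMkGroups_bounds {α : Type} (p : α → Bool) (T : List α) :
    pvMkGroups T (pvBounds p T) = pvSplit p T := by
  induction T with
  | nil =>
    show pvMkGroups ([] : List α) [-1, 0] = [[]]
    simp [pvMkGroups, PySem.List.slice]
  | cons c T ih =>
    obtain ⟨z, u, hb, hz, hu, hall⟩ := pvBounds_shape p T
    have hbounds : pvBounds p (c :: T) =
        if p c then -1 :: (pvBounds p T).map (· + 1)
        else -1 :: ((pvBounds p T).tail).map (· + 1) := by
      unfold pvBounds
      rw [pvSepsI_cons]
      split
      · simp [List.map_append]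
      · simp [List.map_append]
    by_cases hp : p c = true
    · rw [hbounds, if_pos hp, hb]
      have ha1 : ∀ x ∈ (-1 : Int) :: z :: u, -1 ≤ x := by
        intro x hx
        rcases List.mem_cons.mp hx with h | h
        · omega
        · exact hall x h
      have ha2 : ∀ x ∈ ((-1 : Int) :: z :: u).tail, 0 ≤ x := by
        intro x hx
        rcases List.mem_cons.mp (by simpa using hx) with h | h
        · omega
        · exact hu x h
      have hsh := pvMkGroups_shift c T (-1 :: z :: u) ha1 ha2
      rw [List.map_cons, pvMkGroups_cons,
        show ((-1 : Int) + 1) :: List.map (fun x => x + 1) (z :: u)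
          = List.map (fun x => x + 1) ((-1 : Int) :: z :: u) from rfl,
        hsh, ← hb, ih]
      have : pvSplit p (c :: T) = [] :: pvSplit p T := by simp [pvSplit, hp]
      rw [this]
      rfl
    · rw [hbounds, if_neg hp, hb]
      simp only [List.tail_cons]
      have ha1 : ∀ x ∈ z :: u, -1 ≤ x := by
        intro x hx
        rcases List.mem_cons.mp hx with h | h
        · omega
        · have := hu x h; omega
      have ha2 : ∀ x ∈ (z :: u).tail, 0 ≤ x := by
        intro x hx
        exact hu x (by simpa using hx)
      have hsh := pvMkGroups_shift c T (z :: u) ha1 ha2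
      rw [List.map_cons, pvMkGroups_cons,
        show (z + 1) :: List.map (fun x => x + 1) u
          = List.map (fun x => x + 1) (z :: u) from rfl,
        hsh]
      rw [pvSliceZeroSucc c T z hz]
      have hTsplit : pvSplit p T = PySem.List.slice T (some ((-1:Int)+1)) (some z) :: pvMkGroups T (z :: u) := by
        rw [← ih, hb, pvMkGroups_cons]
      have h2 : pvSplit p (c :: T) = (pvSplit p T).modifyHead (c :: ·) := by simp [pvSplit, hp]
      rw [h2, hTsplit]
      rfl

theorem pvIndexToZip {α : Type} (T : List α) (bs : List Int) :
    (PySem.List.pyRange 0 ((bs.length : Int) - 1) 1).map (fun k =>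
      PySem.List.slice T (some (PySem.List.pyGetD bs k 0 + 1))
        (some (PySem.List.pyGetD bs (k + 1) 0))) = pvMkGroups T bs := by
  rw [PySem.List.pyRange_one, List.map_map]
  apply List.ext_getElem
  · simp [pvMkGroups]
  · intro k h1 h2
    simp only [List.getElem_map, List.getElem_range, Function.comp]
    have hk : k < bs.length - 1 := by
      simp at h1; omega
    rw [show ((0 : Int) + (k : Int)) = ((k : Nat) : Int) by ring]
    rw [show ((k : Int) + 1) = (((k + 1 : Nat)) : Int) by push_cast; ring,
      PySem.List.pyGetD_natCast, PySem.List.pyGetD_natCast]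
    rw [List.getD_eq_getElem _ _ (by omega), List.getD_eq_getElem _ _ (by omega)]
    simp only [pvMkGroups, List.getElem_map, List.getElem_zip, List.getElem_tail]

theorem pvOuterInner {β : Type} (m : Nat) (h : Nat → Nat → β) : ∀ (is : List Nat) (t : List (List β)),
    (∀ i ∈ is, i < t.length) →
    is.foldl (fun t i => (List.range m).foldl (fun t j => t.set i (t.getD i [] ++ [h i j])) t) t =
    is.foldl (fun t i => t.set i (t.getD i [] ++ (List.range m).map (h i))) t := by
  intro is
  induction is with
  | nil => intro t _; rfl
  | cons i is ih =>
    intro t hb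
    simp only [List.foldl_cons]
    rw [pvInner (h i) (List.range m) t i (hb i (by simp))]
    exact ih _ (fun x hx => by simpa using hb x (by simp [hx]))

theorem pvBuildT {β : Type} (n m : Nat) (h : Nat → Nat → β) :
    (List.range n).foldl (fun t i => (List.range m).foldl
        (fun t j => t.set i (t.getD i [] ++ [h i j])) t)
      ((List.range n).map (fun _ => ([] : List β)))
    = (List.range n).map (fun i => (List.range m).map (h i)) := by
  rw [pvOuterInner m h (List.range n) _ (by simp)]
  obtain ⟨hlen, hget⟩ := pvOuter (fun i => (List.range m).map (h i)) (List.range n)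
    ((List.range n).map (fun _ => ([] : List β))) (List.nodup_range) (by simp)
  apply List.ext_getElem (by simp at hlen ⊢; omega)
  intro k hk1 hk2
  have hk : k < n := by simpa using hk2
  have h0 : ∀ j, ((List.range n).map (fun _ => ([] : List β))).getD j [] = [] := by
    intro j
    simp only [List.getD_eq_getElem?_getD, List.getElem?_map]
    cases (List.range n)[j]? <;> simp
  have := hget k
  rw [if_pos (by simpa using hk), h0] at this
  rw [List.getD_eq_getElem _ _ hk1] at this
  simp only [this, List.getElem_map, List.getElem_range, List.nil_append]

def pvT (value : List String) : List (List String) :=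
  (List.range (PySem.Str.len ((PySem.List.pyGet? value 0).getD "")).toNat).map (fun (i : Nat) =>
    (List.range value.length).map (fun j => pvIndexChar (value.getD j "") (i : Int)))


theorem pvTransposeA (value : List String) :
    (PySem.List.pyRange 0 (PySem.Str.len ((PySem.List.pyGet? value 0).getD "")) 1).foldl (fun t i =>
      (PySem.List.pyRange 0 (value.length : Int) 1).foldl (fun t j =>
        PySem.List.pySetD t i
          (PySem.List.pyGetD t i [] ++ [pvIndexChar (PySem.List.pyGetD value j "") i])) t)
      ((PySem.List.pyRange 0 (PySem.Str.len ((PySem.List.pyGet? value 0).getD "")) 1).map (fun _ => []))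
    = pvT value := by
  unfold pvT
  rw [PySem.List.pyRange_one, PySem.List.pyRange_one]
  simp only [List.foldl_map, List.map_map, Function.comp_def, zero_add, sub_zero,
    PySem.List.pySetD_natCast, PySem.List.pyGetD_natCast]
  rw [show ((value.length : Int)).toNat = value.length from by omega]
  try rfl
  rw [pvBuildT _ _ (fun i j => pvIndexChar (value.getD j "") (i : Int))]

theorem pvTransposeB (value : List String) :
    (PySem.List.pyRange 0 (PySem.Str.len ((PySem.List.pyGet? value 0).getD "")) 1).map (fun i =>
      (PySem.List.pyRange 0 (value.length : Int) 1).map (fun j =>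
        pvIndexChar (PySem.List.pyGetD value j "") i)) = pvT value := by
  unfold pvT
  rw [PySem.List.pyRange_one, PySem.List.pyRange_one]
  simp only [List.map_map, Function.comp_def, zero_add, sub_zero, PySem.List.pyGetD_natCast]
  rw [show ((value.length : Int)).toNat = value.length from by omega]

theorem pvPredEq (row : List String) (h : row ≠ []) :
    PySem.Set.equal (PySem.Set.ofList row) (PySem.Set.ofList [" "]) = row.all (fun c => c == " ") := by
  rw [Bool.eq_iff_iff, PySem.Set.equal_iff, List.all_eq_true]
  simp only [PySem.Set.mem_ofList, List.mem_singleton, beq_iff_eq]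
  constructor
  · intro hx x hxr
    exact (hx x).1 hxr
  · intro hx x
    constructor
    · exact hx x
    · intro hxe
      subst hxe
      obtain ⟨a, t, rfl⟩ := List.exists_cons_of_ne_nil h
      have := hx a (by simp)
      rw [← this]
      simp

theorem pvSplit_congr {α : Type} (p q : α → Bool) (T : List α)
    (h : ∀ x ∈ T, p x = q x) : pvSplit p T = pvSplit q T := by
  induction T with
  | nil => rfl
  | cons c t ih =>
    simp only [pvSplit, h c (by simp), ih (fun x hx => h x (by simp [hx]))]

theorem pvMain (value : List String) (hne : value ≠ []) :
    parse_input_lines_py value = parse_input_lines_py_alt value := by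
  have hA : parse_input_lines_py value =
      pvSplit (fun row => PySem.Set.equal (PySem.Set.ofList row) (PySem.Set.ofList [" "])) (pvT value) := by
    simp only [parse_input_lines_py]
    rw [pvTransposeA]
    have hfg := pvFoldGroup (fun row => PySem.Set.equal (PySem.Set.ofList row) (PySem.Set.ofList [" "]))
      (pvT value) [] []
    simp only at hfg
    rw [hfg]
    cases h : pvSplit (fun row => PySem.Set.equal (PySem.Set.ofList row) (PySem.Set.ofList [" "])) (pvT value) with
    | nil => rfl
    | cons g r => simp [List.modifyHead]
  have hwidth : ((pvT value).length : Int) = PySem.Str.len ((PySem.List.pyGet? value 0).getD "") := by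
    simp [pvT, PySem.Str.len_eq]
  have hB : parse_input_lines_py_alt value =
      pvMkGroups (pvT value) (pvBounds (fun row => row.all (fun c => c == " ")) (pvT value)) := by
    simp only [parse_input_lines_py_alt]
    rw [pvTransposeB]
    have hb : ([(-1 : Int)] ++ List.map (fun x => x.1)
          (List.filter (fun q => q.2.all fun c => c == " ") (PySem.List.enumerate (pvT value))) ++
        [PySem.Str.len ((PySem.List.pyGet? value 0).getD "")])
        = pvBounds (fun row => row.all (fun c => c == " ")) (pvT value) := by
      simp [pvBounds, pvSepsI, pvT, PySem.Str.len_eq]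
    rw [hb, pvIndexToZip]
  rw [hA, hB, pvMkGroups_bounds]
  apply pvSplit_congr
  intro row hrow
  have hlen : row.length = value.length := by
    simp only [pvT, List.mem_map] at hrow
    obtain ⟨i, _, rfl⟩ := hrow
    simp
  have hnil : row ≠ [] := by
    intro hcon
    rw [hcon] at hlen
    exact hne (List.eq_nil_of_length_eq_zero hlen.symm)
  exact pvPredEq row hnil

-- ===== VERDICT (by name: the statement is the Claim_ definition above) =====
theorem parse_input_lines_py_spec : Claim_equal_parse_input_lines_py := by
  intro value _ hpre
  unfold Spec_parse_input_lines_py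
  exact pvMain value hpre.1
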